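-- pv_equiv track=rewrite | github.com/Mavireck/Python-Screen-Stack-Manager | pssmObjectsLibrairy.py | tools_createTable
-- ===== SOURCE A (Python) =====
-- def tools_createTable(area,rows,cols,borders=[(0,0),(0,0)],min_height=-1,min_width=-1,max_height=-1,max_width=-1):
--     """
--     Returns a list of coordinates in order to help create a rows*cols Table
--     If any dimension is bigger than the corresponding max_size
--     > area : a [(x,y),(w,h)] list
--     > rows (int) : number of rows
--     > cols (int) : number of columns
--     > borders : [(border_left,border_top),(border_right,border_bottom)] - borders around each item
--     """
--     (x,y),(w,h) = area
--     (b_left,b_top),(b_right,b_bottom) = borders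
--     if max_height<=0:
--         max_height=h
--     if max_width<=0:
--         max_width=w
--     calculated_height = int(h/rows - b_top  - b_bottom)
--     calculated_width  = int(w/cols - b_left - b_right)
--     item_height = min(max_height,max(min_height,calculated_height))
--     item_width  = min(max_width, max(min_width, calculated_width ))
--     total_item_width = b_left + item_width  + b_right
--     total_item_height= b_top  + item_height + b_bottom
--     table=[]
--     x0=x
--     for i in range(cols):
--         col=[]
--         y0=y
--         for j in range(rows):
--             item = [
--                 (x0 + b_left, y0 + b_top ),
--                 (item_width , item_height)
--             ]
--             y0 += total_item_height
--             col.append(item)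
--         table.append(col)
--         x0 += total_item_width
--     return table
-- ===== SOURCE B (Python) =====
-- def tools_createTable(area,rows,cols,borders=[(0,0),(0,0)],min_height=-1,min_width=-1,max_height=-1,max_width=-1):
--     (x,y),(w,h) = area
--     (b_left,b_top),(b_right,b_bottom) = borders
--     if max_height <= 0:
--         max_height = h
--     if max_width <= 0:
--         max_width = w
--     calculated_height = int(h/rows - b_top  - b_bottom)
--     calculated_width  = int(w/cols - b_left - b_right)
--     item_height = min(max_height, max(min_height, calculated_height))
--     item_width  = min(max_width,  max(min_width,  calculated_width))
--     total_item_width  = b_left + item_width  + b_right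
--     total_item_height = b_top  + item_height + b_bottom
--
--     def shifted(cell, dx, dy):
--         (cx, cy), size = cell
--         return [(cx + dx, cy + dy), size]
--
--     # column 0: each cell is the previous cell translated down by one cell pitch
--     cells = []
--     last = [(x + b_left, y + b_top), (item_width, item_height)]
--     for _ in range(rows):
--         cells.append(last)
--         last = shifted(last, 0, total_item_height)
--     # table: each column is the previous column translated right by one cell pitch
--     table = []
--     col = cells
--     for _ in range(cols):
--         table.append(col)
--         col = [shifted(c, total_item_width, 0) for c in col]
--     return table
-- ===== Notes on version B (the rewrite author's own statement) =====
-- stated objective: alternative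
-- what changed: Instead of recomputing every cell from running x0/y0 accumulators, B builds column 0 by repeatedly translating a prototype cell downward by the cell pitch and then builds the table by repeatedly translating the whole previous column rightward; the cell-size computation (including Python's float division in int(h/rows - ...)) is kept identical.
import Mathlib
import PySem

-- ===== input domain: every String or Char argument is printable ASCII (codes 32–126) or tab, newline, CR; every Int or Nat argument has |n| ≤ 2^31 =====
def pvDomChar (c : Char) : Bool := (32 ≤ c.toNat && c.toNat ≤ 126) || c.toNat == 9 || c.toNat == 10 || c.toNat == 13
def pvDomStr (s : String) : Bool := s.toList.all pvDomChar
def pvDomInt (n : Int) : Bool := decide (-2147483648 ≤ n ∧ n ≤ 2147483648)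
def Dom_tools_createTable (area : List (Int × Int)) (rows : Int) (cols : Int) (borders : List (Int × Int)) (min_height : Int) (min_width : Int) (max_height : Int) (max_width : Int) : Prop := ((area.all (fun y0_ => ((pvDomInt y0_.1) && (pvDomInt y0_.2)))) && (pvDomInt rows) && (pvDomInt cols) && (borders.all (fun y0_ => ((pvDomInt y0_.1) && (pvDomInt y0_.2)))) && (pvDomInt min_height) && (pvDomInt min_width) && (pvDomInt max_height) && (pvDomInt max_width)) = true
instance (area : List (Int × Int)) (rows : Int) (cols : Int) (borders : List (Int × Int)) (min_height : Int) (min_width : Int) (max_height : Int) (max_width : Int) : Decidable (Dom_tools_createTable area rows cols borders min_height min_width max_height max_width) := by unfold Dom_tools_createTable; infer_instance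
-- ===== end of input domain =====

-- B builds the grid by geometric translation: column 0 arises by repeatedly shifting a prototype
-- cell down by the cell pitch, and the table by repeatedly shifting the whole previous column
-- right; A instead recomputes every cell from x0/y0 running accumulators. Objective: alternative.

-- ===== PORT A =====
-- Both Python versions contain the identical expression `int(h/rows - b_top - b_bottom)`, which is
-- evaluated in IEEE-754 double precision; the helpers below model it EXACTLY on the |n| ≤ 2^31
-- domain (no overflow/subnormals arise there): correctly-rounded true division, two
-- correctly-rounded subtractions, truncation toward zero.

-- floor of log2 of a positive rational
def pvFloorLog2 (a : ℚ) : Int :=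
  let e0 : Int := (Nat.log2 a.num.natAbs : Int) - (Nat.log2 a.den : Int)
  if (2:ℚ)^(e0+1) ≤ a then e0+1 else if a < (2:ℚ)^e0 then e0-1 else e0

-- round a rational to the nearest IEEE-754 double (round half to even); exact away from
-- subnormal/overflow range, which the |n| ≤ 2^31 domain never reaches
def pvRoundDouble (x : ℚ) : ℚ :=
  if x = 0 then 0 else
    let a := |x|
    let e := pvFloorLog2 a
    let scale : ℚ := (2:ℚ)^(e-52)
    let m := a / scale
    let fl : Int := ⌊m⌋
    let r := m - (fl:ℚ)
    let n : Int := if (1:ℚ)/2 < r then fl+1 else if r < (1:ℚ)/2 then fl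
                   else if fl % 2 = 0 then fl else fl+1
    (if x < 0 then -(n:ℚ) else (n:ℚ)) * scale

-- Python int(float): truncation toward zero (Lean's Int division is T-division, exact here)
def pvTruncFloat (x : ℚ) : Int := x.num / (x.den : Int)

-- int(num/den - b1 - b2) exactly as Python evaluates it
def pvCalcDim (num den b1 b2 : Int) : Int :=
  let d1 := pvRoundDouble ((num:ℚ)/(den:ℚ))
  let d2 := pvRoundDouble (d1 - (b1:ℚ))
  let d3 := pvRoundDouble (d2 - (b2:ℚ))
  pvTruncFloat d3

def tools_createTable (area : List (Int × Int)) (rows : Int) (cols : Int) (borders : List (Int × Int)) (min_height : Int) (min_width : Int) (max_height : Int) (max_width : Int) : List (List (List (Int × Int))) :=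
  match area, borders with
  | [(x,y),(w,h)], [(b_left,b_top),(b_right,b_bottom)] =>
    let maxH := if max_height ≤ 0 then h else max_height
    let maxW := if max_width ≤ 0 then w else max_width
    let calculated_height := pvCalcDim h rows b_top b_bottom
    let calculated_width  := pvCalcDim w cols b_left b_right
    let item_height := min maxH (max min_height calculated_height)
    let item_width  := min maxW (max min_width  calculated_width)
    let total_item_width  := b_left + item_width  + b_right
    let total_item_height := b_top  + item_height + b_bottom
    ((PySem.List.pyRange 0 cols 1).foldl
      (fun (st : List (List (List (Int × Int))) × Int) _ =>
        let col := (PySem.List.pyRange 0 rows 1).foldl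
          (fun (cs : List (List (Int × Int)) × Int) _ =>
            (cs.1 ++ [[(st.2 + b_left, cs.2 + b_top), (item_width, item_height)]],
             cs.2 + total_item_height))
          (([] : List (List (Int × Int))), y)
        (st.1 ++ [col.1], st.2 + total_item_width))
      (([] : List (List (List (Int × Int)))), x)).1
  | _, _ => []

-- ===== PORT B =====
-- Source B evaluates the same cell-size expressions as A (int(h/rows - ...) etc.); its port reuses the
-- float-model helpers above for exactly that shared Python code.

-- Python helper `shifted(cell, dx, dy)`: tuple unpacking '(cx, cy), size = cell' ported by hand
-- via a length test and indexing (every call site passes a 2-element cell)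
def pvShifted (cell : List (Int × Int)) (dx dy : Int) : List (Int × Int) :=
  if cell.length = 2 then
    [((cell.getD 0 (0,0)).1 + dx, (cell.getD 0 (0,0)).2 + dy), cell.getD 1 (0,0)]
  else []

def tools_createTable_alt (area : List (Int × Int)) (rows : Int) (cols : Int) (borders : List (Int × Int)) (min_height : Int) (min_width : Int) (max_height : Int) (max_width : Int) : List (List (List (Int × Int))) :=
  -- tuple unpacking '(x,y),(w,h) = area' ported by hand via a length test and indexing
  if area.length = 2 ∧ borders.length = 2 then
    let x := (area.getD 0 (0,0)).1; let y := (area.getD 0 (0,0)).2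
    let w := (area.getD 1 (0,0)).1; let h := (area.getD 1 (0,0)).2
    let b_left  := (borders.getD 0 (0,0)).1; let b_top    := (borders.getD 0 (0,0)).2
    let b_right := (borders.getD 1 (0,0)).1; let b_bottom := (borders.getD 1 (0,0)).2
    let maxH := if max_height ≤ 0 then h else max_height
    let maxW := if max_width ≤ 0 then w else max_width
    let calculated_height := pvCalcDim h rows b_top b_bottom
    let calculated_width  := pvCalcDim w cols b_left b_right
    let item_height := min maxH (max min_height calculated_height)
    let item_width  := min maxW (max min_width  calculated_width)
    let tw := b_left + item_width  + b_right
    let th := b_top  + item_height + b_bottom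
    -- column 0: repeatedly translate the prototype cell downward
    let colPair := (PySem.List.pyRange 0 rows 1).foldl
      (fun (st : List (List (Int × Int)) × List (Int × Int)) _ =>
        (st.1 ++ [st.2], pvShifted st.2 0 th))
      (([] : List (List (Int × Int))), [(x + b_left, y + b_top), (item_width, item_height)])
    -- table: repeatedly translate the whole previous column rightward
    ((PySem.List.pyRange 0 cols 1).foldl
      (fun (st : List (List (List (Int × Int))) × List (List (Int × Int))) _ =>
        (st.1 ++ [st.2], st.2.map (fun c => pvShifted c tw 0)))
      (([] : List (List (List (Int × Int)))), colPair.1)).1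
  else []

-- ===== PRECONDITION & SPEC =====
-- Pre_ excludes exactly the inputs where A raises: area or borders not of length 2
-- (unpacking ValueError) and rows = 0 or cols = 0 (ZeroDivisionError in h/rows, w/cols).
def Pre_tools_createTable (area : List (Int × Int)) (rows : Int) (cols : Int) (borders : List (Int × Int)) (min_height : Int) (min_width : Int) (max_height : Int) (max_width : Int) : Prop :=
  area.length = 2 ∧ borders.length = 2 ∧ rows ≠ 0 ∧ cols ≠ 0
instance (area : List (Int × Int)) (rows : Int) (cols : Int) (borders : List (Int × Int)) (min_height : Int) (min_width : Int) (max_height : Int) (max_width : Int) : Decidable (Pre_tools_createTable area rows cols borders min_height min_width max_height max_width) := by unfold Pre_tools_createTable; infer_instance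

def pvWitness_tools_createTable : (List (Int × Int)) × Int × Int × (List (Int × Int)) × Int × Int × Int × Int :=
  ([(0,0),(100,50)], 2, 2, [(1,1),(1,1)], -1, -1, -1, -1)

def Spec_tools_createTable (area : List (Int × Int)) (rows : Int) (cols : Int) (borders : List (Int × Int)) (min_height : Int) (min_width : Int) (max_height : Int) (max_width : Int) (out : List (List (List (Int × Int)))) : Prop := out = tools_createTable_alt area rows cols borders min_height min_width max_height max_width
instance (area : List (Int × Int)) (rows : Int) (cols : Int) (borders : List (Int × Int)) (min_height : Int) (min_width : Int) (max_height : Int) (max_width : Int) (out : List (List (List (Int × Int)))) : Decidable (Spec_tools_createTable area rows cols borders min_height min_width max_height max_width out) := by unfold Spec_tools_createTable; infer_instance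

-- ===== CLAIM (what is proved, stated in full; the proofs are below) =====
def Claim_equal_tools_createTable : Prop := ∀ (area : List (Int × Int)) (rows : Int) (cols : Int) (borders : List (Int × Int)) (min_height : Int) (min_width : Int) (max_height : Int) (max_width : Int), Dom_tools_createTable area rows cols borders min_height min_width max_height max_width → Pre_tools_createTable area rows cols borders min_height min_width max_height max_width → Spec_tools_createTable area rows cols borders min_height min_width max_height max_width (tools_createTable area rows cols borders min_height min_width max_height max_width)

-- ===== LEMMAS AND PROOFS =====

-- A's inner loop (running y0 accumulator) equals index arithmetic over the row index
theorem pv_inner (bl bt iw ih tih x0 : Int) (l : List Int) (acc : List (List (Int × Int))) (y0 : Int) :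
    List.foldl (fun (cs : List (List (Int × Int)) × Int) (_ : Int) =>
        (cs.1 ++ [[(x0 + bl, cs.2 + bt), (iw, ih)]], cs.2 + tih)) (acc, y0) l
    = (acc ++ (List.range l.length).map
          (fun (j : ℕ) => [(x0 + bl, y0 + (j : Int) * tih + bt), (iw, ih)]),
       y0 + (l.length : Int) * tih) := by
  induction l generalizing acc y0 with
  | nil => simp
  | cons a t ih2 =>
    simp only [List.foldl_cons]
    rw [ih2]
    simp only [List.length_cons, List.range_succ_eq_map, List.map_cons, List.map_map,
      Prod.mk.injEq]
    refine ⟨?_, by push_cast; ring⟩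
    rw [List.append_assoc, List.singleton_append]
    congr 1
    simp
    intro a _
    ring

-- A's outer loop (running x0 accumulator) equals index arithmetic over the column index
theorem pv_outer (bl bt iw ih tiw tih y : Int) (N : ℕ) (l : List Int)
    (tab : List (List (List (Int × Int)))) (x0 : Int) :
    List.foldl (fun (st : List (List (List (Int × Int))) × Int) (_ : Int) =>
        (st.1 ++ [(List.range N).map
            (fun (j : ℕ) => [(st.2 + bl, y + (j : Int) * tih + bt), (iw, ih)])],
         st.2 + tiw)) (tab, x0) l
    = (tab ++ (List.range l.length).map (fun (i : ℕ) => (List.range N).map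
          (fun (j : ℕ) => [(x0 + (i : Int) * tiw + bl, y + (j : Int) * tih + bt), (iw, ih)])),
       x0 + (l.length : Int) * tiw) := by
  induction l generalizing tab x0 with
  | nil => simp
  | cons a t ih2 =>
    simp only [List.foldl_cons]
    rw [ih2]
    simp only [List.length_cons, List.range_succ_eq_map, List.map_cons, List.map_map,
      Prod.mk.injEq]
    refine ⟨?_, by push_cast; ring⟩
    rw [List.append_assoc, List.singleton_append]
    congr 1
    simp
    intro i _ _ _
    ring

-- B's inner loop (translate the last cell down) equals index arithmetic over the row index
theorem pv_alt_inner (th cx iw ih : Int) (l : List Int) (acc : List (List (Int × Int))) (cy : Int) :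
    List.foldl (fun (st : List (List (Int × Int)) × List (Int × Int)) (_ : Int) =>
        (st.1 ++ [st.2], pvShifted st.2 0 th))
      (acc, [(cx, cy), (iw, ih)]) l
    = (acc ++ (List.range l.length).map
          (fun (j : ℕ) => [(cx, cy + (j : Int) * th), (iw, ih)]),
       [(cx, cy + (l.length : Int) * th), (iw, ih)]) := by
  induction l generalizing acc cy with
  | nil => simp
  | cons a t ih2 =>
    simp only [List.foldl_cons]
    have hs : pvShifted [(cx, cy), (iw, ih)] 0 th = [(cx, cy + th), (iw, ih)] := by
      simp [pvShifted]
    rw [hs, ih2]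
    simp only [List.length_cons, List.range_succ_eq_map, List.map_cons, List.map_map,
      Prod.mk.injEq]
    refine ⟨?_, ?_⟩
    · rw [List.append_assoc, List.singleton_append]
      congr 1
      simp
      intro j _
      ring
    · simp
      ring

-- B's outer loop (translate the whole column right) equals index arithmetic over the column index
theorem pv_alt_outer (tw cy th iw ih : Int) (N : ℕ) (l : List Int)
    (tab : List (List (List (Int × Int)))) (cx : Int) :
    List.foldl (fun (st : List (List (List (Int × Int))) × List (List (Int × Int))) (_ : Int) =>
        (st.1 ++ [st.2], st.2.map (fun c => pvShifted c tw 0)))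
      (tab, (List.range N).map (fun (j : ℕ) => [(cx, cy + (j : Int) * th), (iw, ih)])) l
    = (tab ++ (List.range l.length).map (fun (i : ℕ) => (List.range N).map
          (fun (j : ℕ) => [(cx + (i : Int) * tw, cy + (j : Int) * th), (iw, ih)])),
       (List.range N).map (fun (j : ℕ) => [(cx + (l.length : Int) * tw, cy + (j : Int) * th), (iw, ih)])) := by
  induction l generalizing tab cx with
  | nil => simp
  | cons a t ih2 =>
    simp only [List.foldl_cons]
    have hshift : ((List.range N).map (fun (j : ℕ) => [(cx, cy + (j : Int) * th), (iw, ih)])).map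
        (fun c => pvShifted c tw 0)
        = (List.range N).map (fun (j : ℕ) => [(cx + tw, cy + (j : Int) * th), (iw, ih)]) := by
      simp [pvShifted]
    rw [hshift, ih2]
    simp only [List.length_cons, List.range_succ_eq_map, List.map_cons, List.map_map,
      Prod.mk.injEq]
    refine ⟨?_, ?_⟩
    · rw [List.append_assoc, List.singleton_append]
      congr 1
      simp
      intro i _ j _
      ring
    · simp
      intro j _
      ring

-- ===== VERDICT (by name: the statement is the Claim_ definition above) =====
theorem tools_createTable_spec : Claim_equal_tools_createTable := by
  intro area rows cols borders min_height min_width max_height max_width _hdom hpre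
  obtain ⟨ha, hb, _hr, _hc⟩ := hpre
  unfold Spec_tools_createTable
  match area, ha with
  | [(x,y),(w,h)], _ =>
  match borders, hb with
  | [(bl,bt),(br,bb)], _ =>
  simp only [tools_createTable, tools_createTable_alt]
  norm_num [List.getD]
  rw [PySem.List.pyRange_one 0 cols, PySem.List.pyRange_one 0 rows]
  simp only [pv_inner, List.nil_append, List.length_map, List.length_range]
  simp only [pv_outer, List.nil_append, List.length_map, List.length_range]
  simp only [pv_alt_inner, List.nil_append, List.length_map, List.length_range]
  simp only [pv_alt_outer, List.nil_append, List.length_map, List.length_range]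
  refine List.map_congr_left ?_
  intro i _
  refine List.map_congr_left ?_
  intro j _
  simp only [List.cons.injEq, Prod.mk.injEq, and_true]
  exact ⟨by ring, by ring⟩
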